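-- pv_equiv track=rewrite | github.com/bardia-mhd/C4B_APR | data_directory/1219_problem_id/69039_author_id/Accepted.py | count_times
-- ===== SOURCE A (Python) =====
-- def count_times(row):
-- 	res = int(row != '')
-- 	hand = 0
-- 	n = len(row)
-- 	for i in range(1, n):
-- 		hand += 1
-- 		if hand == 5 or row[i] != row[i - 1]:
-- 			hand = 0
-- 			res += 1
--
-- 	return res
-- ===== SOURCE B (Python) =====
-- def count_times(row):
--     total = 0
--     i = 0
--     n = len(row)
--     while i < n:
--         j = i + 1
--         while j < n and row[j] == row[i]:
--             j += 1
--         total += (j - i + 4) // 5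
--         i = j
--     return total
-- ===== Notes on version B (the rewrite author's own statement) =====
-- stated objective: alternative
-- what changed: B scans each maximal run of equal characters with a two-pointer loop and adds the closed form ceil(L/5) per run, instead of A's per-character hand counter that resets at 5 or on boundaries.
import Mathlib
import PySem

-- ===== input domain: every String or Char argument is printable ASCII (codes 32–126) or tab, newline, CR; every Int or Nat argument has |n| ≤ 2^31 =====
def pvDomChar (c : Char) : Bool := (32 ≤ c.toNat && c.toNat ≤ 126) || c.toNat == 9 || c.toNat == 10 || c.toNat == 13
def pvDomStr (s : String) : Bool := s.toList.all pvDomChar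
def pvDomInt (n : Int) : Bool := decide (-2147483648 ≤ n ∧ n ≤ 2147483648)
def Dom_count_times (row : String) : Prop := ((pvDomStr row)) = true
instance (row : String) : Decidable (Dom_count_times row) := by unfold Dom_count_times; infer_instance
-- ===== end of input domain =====

-- B replaces A's per-character hand counter by a run scan with the closed form ceil(L/5) per run (alternative decomposition, same cost).

-- ===== PORT A =====
-- A's for-loop compares row[i] with row[i-1]; ported as the obvious structural
-- recursion over the character list carrying the predecessor char and the same
-- (res, hand) state.
def countTimesAux (res hand : Int) (prev : Char) : List Char → Int
  | [] => res
  | c :: cs =>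
    let hand' := hand + 1
    if hand' = 5 ∨ c ≠ prev then countTimesAux (res + 1) 0 c cs
    else countTimesAux res hand' c cs

def count_times (row : String) : Int :=
  match row.toList with
  | [] => 0                      -- res = int(row != '') = 0, loop body never runs
  | c :: cs => countTimesAux 1 0 c cs   -- res = 1, hand = 0

-- ===== PORT B =====
-- Source B: outer while finds the maximal run (inner while = takeWhile), adds
-- (runLength + 4) // 5, continues after the run (dropWhile).
def countTimesRuns : List Char → Int
  | [] => 0
  | c :: cs =>
    ((1 + (cs.takeWhile (· == c)).length + 4) / 5 : Nat) +
      countTimesRuns (cs.dropWhile (· == c))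
termination_by l => l.length
decreasing_by
  simpa using Nat.lt_succ_of_le (List.length_dropWhile_le _ _)

def count_times_alt (row : String) : Int := countTimesRuns row.toList

-- ===== PRECONDITION & SPEC =====
def Spec_count_times (row : String) (out : Int) : Prop := out = count_times_alt row
instance (row : String) (out : Int) : Decidable (Spec_count_times row out) := by unfold Spec_count_times; infer_instance

-- ===== CLAIM (what is proved, stated in full; the proofs are below) =====
def Claim_equal_count_times : Prop := ∀ (row : String), Dom_count_times row → Spec_count_times row (count_times row)

-- ===== LEMMAS AND PROOFS =====

theorem countTimesRuns_cons (c : Char) (cs : List Char) :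
    countTimesRuns (c :: cs) =
      ((1 + (cs.takeWhile (· == c)).length + 4) / 5 : Nat) +
        countTimesRuns (cs.dropWhile (· == c)) := by
  rw [countTimesRuns.eq_def]

-- Loop invariant: with 0 ≤ hand ≤ 4, the rest of A's loop contributes the
-- resets inside the current run of `prev` plus the run sums of the remainder.
theorem countTimesAux_eq (cs : List Char) : ∀ (res hand : Int) (prev : Char),
    0 ≤ hand → hand ≤ 4 →
    countTimesAux res hand prev cs =
      res + ((hand.toNat + (cs.takeWhile (· == prev)).length) / 5 : Nat) +
        countTimesRuns (cs.dropWhile (· == prev)) := by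
  induction cs with
  | nil =>
    intro res hand prev h0 h4
    simp only [countTimesAux, List.takeWhile_nil, List.dropWhile_nil, countTimesRuns,
      List.length_nil]
    omega
  | cons c cs ih =>
    intro res hand prev h0 h4
    by_cases hc : c = prev
    · subst hc
      simp only [List.takeWhile_cons, List.dropWhile_cons, beq_self_eq_true, if_true,
        List.length_cons]
      by_cases h5 : hand = 4
      · subst h5
        rw [countTimesAux, if_pos (show (4:Int)+1 = 5 ∨ c ≠ c from Or.inl (by norm_num)), ih (res + 1) 0 c (by omega) (by omega)]
        generalize (cs.takeWhile (· == c)).length = t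
        generalize countTimesRuns (cs.dropWhile (· == c)) = R
        omega
      · rw [countTimesAux, if_neg (show ¬(hand + 1 = 5 ∨ c ≠ c) by
            simp only [ne_eq, not_true_eq_false, or_false]; omega),
          ih res (hand + 1) c (by omega) (by omega)]
        generalize (cs.takeWhile (· == c)).length = t
        generalize countTimesRuns (cs.dropWhile (· == c)) = R
        omega
    · have hbe : (c == prev) = false := by simp [hc]
      rw [countTimesAux, if_pos (Or.inr hc), ih (res + 1) 0 c (by omega) (by omega)]
      simp only [List.takeWhile_cons, List.dropWhile_cons, hbe, Bool.false_eq_true,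
        if_false, List.length_nil]
      rw [countTimesRuns_cons]
      generalize (cs.takeWhile (· == c)).length = t
      generalize countTimesRuns (cs.dropWhile (· == c)) = R
      omega

-- ===== VERDICT (by name: the statement is the Claim_ definition above) =====
theorem count_times_spec : Claim_equal_count_times := by
  intro row _
  unfold Spec_count_times count_times count_times_alt
  cases h : row.toList with
  | nil => show (0 : Int) = countTimesRuns []; rw [countTimesRuns]
  | cons c cs =>
    show countTimesAux 1 0 c cs = countTimesRuns (c :: cs)
    rw [countTimesAux_eq cs 1 0 c (by omega) (by omega), countTimesRuns_cons]
    generalize (cs.takeWhile (· == c)).length = t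
    generalize countTimesRuns (cs.dropWhile (· == c)) = R
    omega
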